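-- pv_equiv track=rewrite | github.com/StarsExpress/LeetCode-Repository | prefix_sum/partitions_count/partitions_count.py | count_max_partitions
-- ===== SOURCE A (Python) =====
-- def count_max_partitions(nums: list[int], k: int) -> int:  # LeetCode Q.2025.
--     total_sum, total_nums = sum(nums), len(nums)
--
--     max_partition_ways, prefix_sum = 0, nums[0]
--     for pivot in range(1, total_nums):
--         if 2 * prefix_sum == total_sum:
--             max_partition_ways += 1  # A natural pivot.
--         prefix_sum += nums[pivot]
--
--     right_side_diffs: dict[int, int] = dict()
--     suffix_sum = 0
--     for idx, num in enumerate(nums[::-1][:-1]):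
--         suffix_sum += num
--         diff = total_sum - 2 * suffix_sum  # Diff = prefix sum - suffix sum.
--         if diff not in right_side_diffs.keys():
--             right_side_diffs[diff] = 0
--         right_side_diffs[diff] += 1
--
--     left_side_diffs: dict[int, int] = dict()
--     prefix_sum = 0
--     for idx, num in enumerate(nums):
--         partition_ways = 0
--
--         right_change = num - k
--         if right_change in right_side_diffs.keys():
--             partition_ways += right_side_diffs[right_change]
--
--         left_change = k - num
--         if left_change in left_side_diffs.keys():
--             partition_ways += left_side_diffs[left_change]
--
--         if partition_ways > max_partition_ways:
--             max_partition_ways = partition_ways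
--
--         prefix_sum += num
--         if idx > 0:  # Suffix doesn't cover num at 0th idx.
--             suffix_sum -= num
--
--         diff = prefix_sum - suffix_sum  # Diff = prefix sum - suffix sum.
--         if diff not in left_side_diffs.keys():
--             left_side_diffs[diff] = 0
--         left_side_diffs[diff] += 1
--
--         if diff in right_side_diffs.keys():
--             right_side_diffs[diff] -= 1
--
--     return max_partition_ways
-- ===== SOURCE B (Python) =====
-- def count_max_partitions(nums: list[int], k: int) -> int:  # LeetCode Q.2025.
--     # Brute-force the definition directly: baseline pivots, then try changing
--     # each position to k and recount valid pivots with a fresh prefix scan.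
--     n = len(nums)
--     total = sum(nums)
--     prefs = []           # prefs[p-1] = sum(nums[:p]) for p = 1..n-1
--     acc = 0
--     for x in nums[:-1]:
--         acc += x
--         prefs.append(acc)
--     best = sum(1 for p in prefs if 2 * p == total)
--     for i in range(n):
--         delta = k - nums[i]
--         new_total = total + delta
--         ways = 0
--         for p_idx, p in enumerate(prefs):
--             adjusted = p + (delta if i <= p_idx else 0)
--             if 2 * adjusted == new_total:
--                 ways += 1
--         if ways > best:
--             best = ways
--     return best
-- ===== Notes on version B (the rewrite author's own statement) =====
-- stated objective: simpler
-- what changed: Replaces A's incremental left/right difference-count dictionaries and reversed suffix pre-pass by the direct brute force: compute the prefix sums once, count baseline pivots, then for each single change of nums[i] to k re-scan the (adjusted) prefix sums and keep the running maximum.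
import Mathlib
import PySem

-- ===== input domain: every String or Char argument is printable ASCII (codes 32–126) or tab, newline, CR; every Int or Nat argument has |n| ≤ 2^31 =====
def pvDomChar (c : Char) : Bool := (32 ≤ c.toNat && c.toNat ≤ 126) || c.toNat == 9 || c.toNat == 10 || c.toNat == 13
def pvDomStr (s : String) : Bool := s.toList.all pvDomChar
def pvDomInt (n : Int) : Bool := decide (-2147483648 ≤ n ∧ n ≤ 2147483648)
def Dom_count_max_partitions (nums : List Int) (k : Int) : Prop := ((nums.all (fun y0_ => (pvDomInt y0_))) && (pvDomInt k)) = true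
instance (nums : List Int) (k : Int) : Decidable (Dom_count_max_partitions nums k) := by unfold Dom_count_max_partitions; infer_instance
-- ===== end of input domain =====

-- B is the direct brute-force reading of the task (baseline pivots, then re-scan for each single change
-- to k), replacing A's incremental left/right difference-count dictionaries; objective: simpler, not faster.

-- ===== PORT A =====
def count_max_partitions (nums : List Int) (k : Int) : Int :=
  let total_sum := nums.sum
  let total_nums : Int := nums.length
  -- prefix_sum = nums[0]: Python raises IndexError on []; Pre_ excludes [], so the pyGetD default 0 is unreachable inside Pre_
  let s1 := (PySem.List.pyRange 1 total_nums 1).foldl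
    (fun (st : Int × Int) pivot =>
      (if 2 * st.2 == total_sum then st.1 + 1 else st.1,
       st.2 + PySem.List.pyGetD nums pivot 0))
    (0, PySem.List.pyGetD nums 0 0)
  -- nums[::-1] is nums.reverse (PySem.List.slice?_none_none_neg_one); [:-1] is the slice below
  let rev := PySem.List.slice nums.reverse none (some (-1))
  let s2 := (PySem.List.enumerate rev).foldl
    (fun (st : PySem.Dict Int Int × Int) p =>
      let suffix := st.2 + p.2
      let diff := total_sum - 2 * suffix
      let d := if st.1.contains diff then st.1 else st.1.insert diff 0
      (d.insert diff (d.getD diff 0 + 1), suffix))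
    (PySem.Dict.empty, 0)
  let s3 := (PySem.List.enumerate nums).foldl
    (fun (st : Int × PySem.Dict Int Int × PySem.Dict Int Int × Int × Int) p =>
      let idx := p.1
      let num := p.2
      let m := st.1
      let left := st.2.1
      let right := st.2.2.1
      let pw : Int := 0
      let pw := if right.contains (num - k) then pw + right.getD (num - k) 0 else pw
      let pw := if left.contains (k - num) then pw + left.getD (k - num) 0 else pw
      let m := if pw > m then pw else m
      let prefix_sum := st.2.2.2.1 + num
      let suffix_sum := if idx > 0 then st.2.2.2.2 - num else st.2.2.2.2
      let diff := prefix_sum - suffix_sum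
      let left := if left.contains diff then left else left.insert diff 0
      let left := left.insert diff (left.getD diff 0 + 1)
      let right := if right.contains diff then right.insert diff (right.getD diff 0 - 1) else right
      (m, left, right, prefix_sum, suffix_sum))
    (s1.1, PySem.Dict.empty, s2.1, 0, s2.2)
  s3.1

-- ===== PORT B =====
def count_max_partitions_alt (nums : List Int) (k : Int) : Int :=
  let n : Int := nums.length
  let total := nums.sum
  let s := (PySem.List.slice nums none (some (-1))).foldl
    (fun (st : Int × List Int) x => (st.1 + x, st.2 ++ [st.1 + x])) (0, [])
  let prefs := s.2
  let base := prefs.foldl (fun b p => if 2 * p == total then b + 1 else b) 0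
  (PySem.List.pyRange 0 n 1).foldl (fun best i =>
    let delta := k - PySem.List.pyGetD nums i 0
    let newTotal := total + delta
    let ways := (PySem.List.enumerate prefs).foldl (fun w pr =>
      let adjusted := pr.2 + (if i ≤ pr.1 then delta else 0)
      if 2 * adjusted == newTotal then w + 1 else w) 0
    if ways > best then ways else best) base

-- ===== PRECONDITION & SPEC =====
-- Pre_ excludes only the empty list, on which A raises IndexError at nums[0].
def Pre_count_max_partitions (nums : List Int) (k : Int) : Prop := nums ≠ []
instance (nums : List Int) (k : Int) : Decidable (Pre_count_max_partitions nums k) := by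
  unfold Pre_count_max_partitions; infer_instance
def pvWitness_count_max_partitions : List Int × Int := ([1, 2, 1], 2)

def Spec_count_max_partitions (nums : List Int) (k : Int) (out : Int) : Prop := out = count_max_partitions_alt nums k
instance (nums : List Int) (k : Int) (out : Int) : Decidable (Spec_count_max_partitions nums k out) := by unfold Spec_count_max_partitions; infer_instance

-- ===== CLAIM (what is proved, stated in full; the proofs are below) =====
def Claim_equal_count_max_partitions : Prop := ∀ (nums : List Int) (k : Int), Dom_count_max_partitions nums k → Pre_count_max_partitions nums k → Spec_count_max_partitions nums k (count_max_partitions nums k)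

-- ===== LEMMAS AND PROOFS =====


def pvPrefs : Int → List Int → List Int
  | _, [] => []
  | a, x :: xs => (a + x) :: pvPrefs (a + x) xs
def pvTested : Int → List Int → List Int
  | _, [] => []
  | a, x :: xs => a :: pvTested (a + x) xs
def pvDiffs (T : Int) : Int → List Int → List Int
  | _, [] => []
  | s, x :: xs => (T - 2 * (s + x)) :: pvDiffs T (s + x) xs

theorem pvPrefs_length (a : Int) (l : List Int) : (pvPrefs a l).length = l.length := by
  induction l generalizing a with
  | nil => rfl
  | cons x xs ih => simp [pvPrefs, ih]

theorem pvPrefs_getElem (a : Int) (l : List Int) (j : Nat) (h : j < l.length)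
    (h' : j < (pvPrefs a l).length) : (pvPrefs a l)[j] = a + (l.take (j + 1)).sum := by
  induction l generalizing a j with
  | nil => simp at h
  | cons x xs ih =>
    cases j with
    | zero => simp [pvPrefs]
    | succ j =>
      simp only [pvPrefs, List.getElem_cons_succ, List.take_succ_cons, List.sum_cons]
      rw [ih (a + x) j (by simpa using h) (by simpa [pvPrefs] using h')]
      ring

theorem pvPrefs_dropLast (a : Int) (l : List Int) :
    (pvPrefs a l).dropLast = pvPrefs a l.dropLast := by
  induction l generalizing a with
  | nil => rfl
  | cons x xs ih =>
    cases xs with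
    | nil => rfl
    | cons y ys =>
      have h : pvPrefs (a + x) (y :: ys) ≠ [] := by simp [pvPrefs]
      rw [show pvPrefs a (x :: y :: ys) = (a + x) :: pvPrefs (a + x) (y :: ys) from rfl,
          List.dropLast_cons_of_ne_nil h, ih,
          show (x :: y :: ys).dropLast = x :: (y :: ys).dropLast from rfl,
          show pvPrefs a (x :: (y :: ys).dropLast) = (a + x) :: pvPrefs (a + x) (y :: ys).dropLast from rfl]

theorem pvTested_eq (a : Int) (l : List Int) :
    pvTested a l = (a :: pvPrefs a l).dropLast := by
  induction l generalizing a with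
  | nil => rfl
  | cons x xs ih => simp only [pvTested, pvPrefs, List.dropLast_cons₂, ih]

theorem pvDiffs_eq_map (T a : Int) (l : List Int) :
    pvDiffs T a l = (pvPrefs a l).map (fun t => T - 2 * t) := by
  induction l generalizing a with
  | nil => rfl
  | cons x xs ih => simp only [pvDiffs, pvPrefs, List.map_cons, ih]

theorem bprefs_eq (l : List Int) (a : Int) (P : List Int) :
    (l.foldl (fun (st : Int × List Int) x => (st.1 + x, st.2 ++ [st.1 + x])) (a, P))
      = (a + l.sum, P ++ pvPrefs a l) := by
  induction l generalizing a P with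
  | nil => simp [pvPrefs]
  | cons x xs ih => rw [List.foldl_cons, ih]; simp [pvPrefs, add_assoc]

theorem loop1_eq (T : Int) (l : List Int) (m a : Int) :
    ((l.foldl (fun (st : Int × Int) x =>
        (if 2 * st.2 == T then st.1 + 1 else st.1, st.2 + x)) (m, a)).1)
      = m + ((pvTested a l).countP (fun p => 2 * p == T) : Int) := by
  induction l generalizing m a with
  | nil => simp [pvTested]
  | cons x xs ih =>
    simp only [List.foldl_cons, ih, pvTested, List.countP_cons]
    by_cases h : (2 * a == T) = true <;> simp [h] <;> push_cast <;> ring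

theorem innerWays_eq (T dl : Int) (i : Int) (l : List Int) (j : Nat) (w : Int) :
    ((PySem.List.enumerate l (j : Int)).foldl (fun w pr =>
        if 2 * (pr.2 + (if i ≤ pr.1 then dl else 0)) == T + dl then w + 1 else w) w)
      = w + ((l.take (i - (j : Int)).toNat).countP (fun p => 2 * p == T + dl) : Int)
          + ((l.drop (i - (j : Int)).toNat).countP (fun p => 2 * (p + dl) == T + dl) : Int) := by
  induction l generalizing j w with
  | nil => simp [PySem.List.enumerate]
  | cons x xs ih =>
    rw [PySem.List.enumerate_cons, List.foldl_cons]
    have hj1 : ((j : Int) + 1) = ((j + 1 : Nat) : Int) := by push_cast; ring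
    rw [hj1, ih]
    by_cases hle : i ≤ (j : Int)
    · have h0 : (i - (j : Int)).toNat = 0 := by omega
      have h1 : (i - ((j + 1 : Nat) : Int)).toNat = 0 := by push_cast; omega
      simp only [h0, h1, if_pos hle, List.take_zero, List.drop_zero, List.countP_cons]
      by_cases hc : (2 * (x + dl) == T + dl) = true <;> simp [hc] <;> push_cast <;> ring
    · have h0 : (i - (j : Int)).toNat = (i - ((j + 1 : Nat) : Int)).toNat + 1 := by push_cast; omega
      simp only [h0, if_neg hle, List.take_succ_cons, List.drop_succ_cons, List.countP_cons]
      by_cases hc : (2 * x == T + dl) = true <;> simp [hc] <;> push_cast <;> ring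


-- one "if x not in d: d[x]=0; d[x] += 1" step, as the ports write it
def pvCStep (d : PySem.Dict Int Int) (x : Int) : PySem.Dict Int Int :=
  let d' := if d.contains x then d else d.insert x 0
  d'.insert x (d'.getD x 0 + 1)

theorem pvCStep_getD (d : PySem.Dict Int Int) (x q : Int) :
    (pvCStep d x).getD q 0 = if q = x then d.getD q 0 + 1 else d.getD q 0 := by
  unfold pvCStep
  by_cases hc : d.contains x = true
  · simp only [hc, if_true, PySem.Dict.getD_insert]
    split_ifs with h
    · subst h; rfl
    · rfl
  · simp only [Bool.not_eq_true] at hc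
    simp only [hc, Bool.false_eq_true, if_false, PySem.Dict.getD_insert]
    split_ifs with h
    · subst h; rw [PySem.Dict.getD_of_not_contains _ _ hc]
    · rfl

theorem pvCStep_contains (d : PySem.Dict Int Int) (x q : Int) :
    (pvCStep d x).contains q = (q == x || d.contains q) := by
  unfold pvCStep
  by_cases hc : d.contains x = true
  · simp only [hc, if_true, PySem.Dict.contains_insert]
  · simp only [Bool.not_eq_true] at hc
    simp only [hc, Bool.false_eq_true, if_false, PySem.Dict.contains_insert]
    rw [← Bool.or_assoc, Bool.or_self]

theorem counterFold_getD (l : List Int) (d : PySem.Dict Int Int) (q : Int) :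
    (l.foldl pvCStep d).getD q 0 = d.getD q 0 + (l.count q : Int) := by
  induction l generalizing d with
  | nil => simp
  | cons x xs ih =>
    rw [List.foldl_cons, ih, pvCStep_getD, List.count_cons]
    by_cases h : q = x
    · subst h
      simp only [beq_self_eq_true, if_true]
      push_cast
      ring
    · have hb : (x == q) = false := by simpa using Ne.symm h
      simp only [h, if_false, hb, Bool.false_eq_true, add_zero]

theorem counterFold_contains (l : List Int) (d : PySem.Dict Int Int) (q : Int) :
    (l.foldl pvCStep d).contains q = (d.contains q || decide (q ∈ l)) := by
  induction l generalizing d with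
  | nil => simp
  | cons x xs ih =>
    rw [List.foldl_cons, ih, pvCStep_contains]
    by_cases h : q = x
    · simp [h]
    · have hb : (q == x) = false := by simpa using h
      simp [hb, h]

theorem loop2_eq (T : Int) (l : List Int) (j : Int) (d : PySem.Dict Int Int) (s : Int) :
    ((PySem.List.enumerate l j).foldl
      (fun (st : PySem.Dict Int Int × Int) p =>
        let suffix := st.2 + p.2
        let diff := T - 2 * suffix
        let d := if st.1.contains diff then st.1 else st.1.insert diff 0
        (d.insert diff (d.getD diff 0 + 1), suffix)) (d, s))
    = ((pvDiffs T s l).foldl pvCStep d, s + l.sum) := by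
  induction l generalizing j d s with
  | nil => simp [PySem.List.enumerate, pvDiffs]
  | cons x xs ih =>
    rw [PySem.List.enumerate_cons, List.foldl_cons]
    simp only [pvDiffs, List.foldl_cons, List.sum_cons]
    rw [ih]
    simp only [pvCStep]
    simp [add_assoc]

theorem revPrefs_eq (l : List Int) :
    pvPrefs 0 l.reverse.dropLast = ((pvPrefs 0 l.dropLast).map (fun p => l.sum - p)).reverse := by
  apply List.ext_getElem
  · simp [pvPrefs_length]
  · intro j h1 h2
    simp only [List.dropLast_reverse] at h1 ⊢
    have hj : j < l.length - 1 := by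
      rw [pvPrefs_length, List.length_reverse, List.length_tail] at h1; omega
    have hpl : (pvPrefs 0 l.dropLast).length = l.length - 1 := by
      rw [pvPrefs_length, List.length_dropLast]
    have hdll : l.dropLast.length = l.length - 1 := by simp
    rw [pvPrefs_getElem _ _ j (by simp [List.length_tail]; omega) h1]
    rw [List.take_reverse, List.sum_reverse]
    rw [List.getElem_reverse, List.getElem_map]
    simp only [List.length_map, hpl, List.length_tail]
    rw [pvPrefs_getElem _ _ _ (by omega) (by rw [hpl]; omega)]
    obtain ⟨x, t, rfl⟩ : ∃ x t, l = x :: t := by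
      cases l with
      | nil => simp at hj
      | cons x t => exact ⟨x, t, rfl⟩
    simp only [List.length_cons] at hj
    simp only [List.tail_cons, List.length_cons, List.sum_cons, Nat.add_sub_cancel]
    have e1 : (x :: t).dropLast.take (t.length - 1 - j + 1)
        = (x :: t).take (t.length - 1 - j + 1) := by
      rw [List.dropLast_eq_take, List.take_take]
      congr 1
      simp only [List.length_cons, Nat.add_sub_cancel]
      omega
    rw [e1]
    have hj' : t.length - 1 - j + 1 = t.length - j := by omega
    rw [hj', List.take_cons (by omega)]
    simp only [List.sum_cons]
    have e2 : (t.take (t.length - j - 1)).sum + (t.drop (t.length - j - 1)).sum = t.sum :=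
      List.sum_take_add_sum_drop t _
    have e3 : t.length - (j + 1) = t.length - j - 1 := by omega
    rw [e3]
    omega

-- the literal body of A's third loop
def pvAstep (k : Int) (st : Int × PySem.Dict Int Int × PySem.Dict Int Int × Int × Int)
    (p : Int × Int) : Int × PySem.Dict Int Int × PySem.Dict Int Int × Int × Int :=
  let idx := p.1
  let num := p.2
  let m := st.1
  let left := st.2.1
  let right := st.2.2.1
  let pw : Int := 0
  let pw := if right.contains (num - k) then pw + right.getD (num - k) 0 else pw
  let pw := if left.contains (k - num) then pw + left.getD (k - num) 0 else pw
  let m := if pw > m then pw else m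
  let prefix_sum := st.2.2.2.1 + num
  let suffix_sum := if idx > 0 then st.2.2.2.2 - num else st.2.2.2.2
  let diff := prefix_sum - suffix_sum
  let left := if left.contains diff then left else left.insert diff 0
  let left := left.insert diff (left.getD diff 0 + 1)
  let right := if right.contains diff then right.insert diff (right.getD diff 0 - 1) else right
  (m, left, right, prefix_sum, suffix_sum)

-- the literal body of B's outer loop, over (index, element) pairs
def pvBstep (prefs : List Int) (k T : Int) (best : Int) (p : Int × Int) : Int :=
  let delta := k - p.2
  let newTotal := T + delta
  let ways := (PySem.List.enumerate prefs).foldl (fun w pr =>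
    let adjusted := pr.2 + (if p.1 ≤ pr.1 then delta else 0)
    if 2 * adjusted == newTotal then w + 1 else w) 0
  if ways > best then ways else best

theorem mainLoop (nums prefs : List Int) (k T : Int)
    (hT : T = nums.sum) (hprefs : prefs = pvPrefs 0 nums.dropLast) :
    ∀ (l : List Int) (i : Nat) (m pS sS : Int) (left right : PySem.Dict Int Int),
    nums.drop i = l →
    pS = (nums.take i).sum →
    sS = T - (nums.take (max i 1)).sum →
    (∀ q, left.getD q 0 = ((prefs.take i).countP (fun p => 2 * p - T == q) : Int)) →
    (∀ q, left.contains q = false → (prefs.take i).countP (fun p => 2 * p - T == q) = 0) →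
    (∀ q, right.getD q 0 = ((prefs.drop i).countP (fun p => 2 * p - T == q) : Int)) →
    (∀ q, right.contains q = false → prefs.countP (fun p => 2 * p - T == q) = 0) →
    ((PySem.List.enumerate l (i : Int)).foldl (pvAstep k) (m, left, right, pS, sS)).1
      = (PySem.List.enumerate l (i : Int)).foldl (pvBstep prefs k T) m := by
  intro l
  induction l with
  | nil => intro i m pS sS left right _ _ _ _ _ _ _; simp [PySem.List.enumerate]
  | cons x xs ih =>
    intro i m pS sS left right hdrop hpS hsS hLg hLc hRg hRc
    rw [PySem.List.enumerate_cons, List.foldl_cons, List.foldl_cons]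
    have hi : i < nums.length := by
      have := congrArg List.length hdrop
      simp only [List.length_drop, List.length_cons] at this; omega
    have hx : nums[i] = x := by
      have h0 : (nums.drop i)[0]'(by rw [hdrop]; simp) = x := by simp [hdrop]
      simpa using h0
    have hdrop' : nums.drop (i + 1) = xs := by
      rw [← List.tail_drop, hdrop]; rfl
    have htake1 : (nums.take (i + 1)).sum = (nums.take i).sum + x := by
      rw [List.take_succ_eq_append_getElem hi, List.sum_append, hx]; simp
    set pw : Int := (((prefs.drop i).countP (fun p => 2 * p - T == x - k) : Nat) : Int)
      + (((prefs.take i).countP (fun p => 2 * p - T == k - x) : Nat) : Int) with hpw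
    set m' : Int := if pw > m then pw else m with hm'
    have hR1 : (if right.contains (x - k) then (0:Int) + right.getD (x - k) 0 else 0)
        = (((prefs.drop i).countP (fun p => 2 * p - T == x - k) : Nat) : Int) := by
      by_cases hc : right.contains (x - k) = true
      · rw [if_pos hc, zero_add, hRg]
      · rw [if_neg (by simp [hc])]
        have h0 : prefs.countP (fun p => 2 * p - T == x - k) = 0 := hRc _ (by simpa using hc)
        have hle : (prefs.drop i).countP (fun p => 2 * p - T == x - k)
            ≤ prefs.countP (fun p => 2 * p - T == x - k) := (List.drop_sublist i prefs).countP_le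
        omega
    have hApw : (if left.contains (k - x) then
          (if right.contains (x - k) then (0:Int) + right.getD (x - k) 0 else 0) + left.getD (k - x) 0
        else (if right.contains (x - k) then (0:Int) + right.getD (x - k) 0 else 0)) = pw := by
      rw [hR1]
      by_cases hc : left.contains (k - x) = true
      · rw [if_pos hc, hLg]
      · rw [if_neg (by simp [hc])]
        have h0 : (prefs.take i).countP (fun p => 2 * p - T == k - x) = 0 := hLc _ (by simpa using hc)
        rw [hpw, h0]
        simp
    have hB : pvBstep prefs k T m ((i : Nat), x) = m' := by
      have hw := innerWays_eq T (k - x) ((i : Nat) : Int) prefs 0 0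
      simp only [Nat.cast_zero, sub_zero, Int.toNat_natCast, zero_add] at hw
      have hcongr1 : (prefs.take i).countP (fun p => 2 * p == T + (k - x))
          = (prefs.take i).countP (fun p => 2 * p - T == k - x) := by
        apply List.countP_congr
        intro p _
        simp only [beq_iff_eq]
        omega
      have hcongr2 : (prefs.drop i).countP (fun p => 2 * (p + (k - x)) == T + (k - x))
          = (prefs.drop i).countP (fun p => 2 * p - T == x - k) := by
        apply List.countP_congr
        intro p _
        simp only [beq_iff_eq]
        omega
      rw [hcongr1, hcongr2] at hw
      simp only [pvBstep]
      rw [hw, hm', hpw]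
      rw [add_comm (((prefs.take i).countP (fun p => 2 * p - T == k - x) : Nat) : Int)
          (((prefs.drop i).countP (fun p => 2 * p - T == x - k) : Nat) : Int)]
    have hsS' : (if (i : Int) > 0 then sS - x else sS) = T - (nums.take (i + 1)).sum := by
      rcases Nat.eq_zero_or_pos i with h0 | hpos
      · subst h0
        rw [if_neg (by omega)]
        simpa using hsS
      · rw [if_pos (by exact_mod_cast hpos), hsS, Nat.max_eq_left hpos, htake1]
        ring
    have hA : pvAstep k (m, left, right, pS, sS) ((i : Nat), x)
        = (m', pvCStep left (pS + x - (if (i : Int) > 0 then sS - x else sS)),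
           (if right.contains (pS + x - (if (i : Int) > 0 then sS - x else sS))
            then right.insert (pS + x - (if (i : Int) > 0 then sS - x else sS))
              (right.getD (pS + x - (if (i : Int) > 0 then sS - x else sS)) 0 - 1) else right),
           pS + x, (if (i : Int) > 0 then sS - x else sS)) := by
      simp only [pvAstep, pvCStep]
      rw [hApw]
    rw [hA, hB]
    have hcast : ((i : Nat) : Int) + 1 = (((i + 1 : Nat)) : Int) := by push_cast; ring
    rw [hcast]
    rcases xs with _ | ⟨y, ys⟩
    · simp [PySem.List.enumerate]
    · have hi2 : i + 1 < nums.length := by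
        have := congrArg List.length hdrop'
        simp only [List.length_drop, List.length_cons] at this; omega
      have hplen : prefs.length = nums.length - 1 := by
        rw [hprefs, pvPrefs_length, List.length_dropLast]
      have hiP : i < prefs.length := by omega
      have hPi : prefs[i]'hiP = (nums.take (i + 1)).sum := by
        have h1 : nums.dropLast.take (i + 1) = nums.take (i + 1) := by
          rw [List.dropLast_eq_take, List.take_take]
          congr 1
          omega
        subst hprefs
        rw [pvPrefs_getElem _ _ i (by rw [List.length_dropLast]; omega) hiP, h1, zero_add]
      set sS' := (if (i : Int) > 0 then sS - x else sS) with hsSd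
      set diff := pS + x - sS' with hdiffd
      have hdiff : diff = 2 * (prefs[i]'hiP) - T := by
        rw [hdiffd, hsS', hPi, hpS, htake1]
        ring
      have hpdi : ∀ q, (2 * (prefs[i]'hiP) - T == q) = decide (q = diff) := by
        intro q
        apply Bool.eq_iff_iff.mpr
        simp only [beq_iff_eq, decide_eq_true_eq]
        omega
      have htakeP : prefs.take (i + 1) = prefs.take i ++ [prefs[i]'hiP] :=
        List.take_succ_eq_append_getElem hiP
      have hdropP : prefs.drop i = (prefs[i]'hiP) :: prefs.drop (i + 1) :=
        List.drop_eq_getElem_cons hiP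
      apply ih (i + 1) m' (pS + x) sS' (pvCStep left diff)
        (if right.contains diff then right.insert diff (right.getD diff 0 - 1) else right)
        hdrop'
      · rw [hpS, htake1]
      · have hmx : max (i + 1) 1 = i + 1 := by omega
        rw [hsS', hmx]
      · intro q
        rw [pvCStep_getD, htakeP, List.countP_append]
        by_cases hq : q = diff
        · rw [if_pos hq, hLg]
          subst hq
          simp only [List.countP_cons, List.countP_nil, hpdi]
          simp
        · rw [if_neg hq, hLg]
          simp only [List.countP_cons, List.countP_nil, hpdi]
          simp [hq]
      · intro q hq
        rw [pvCStep_contains] at hq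
        simp only [Bool.or_eq_false_iff] at hq
        obtain ⟨hq1, hq2⟩ := hq
        rw [htakeP, List.countP_append, hLc q hq2]
        simp only [List.countP_cons, List.countP_nil, hpdi]
        simp only [beq_eq_false_iff_ne] at hq1
        simp [hq1]
      · intro q
        have hcd : right.contains diff = true := by
          by_contra hc
          have h0 : prefs.countP (fun p => 2 * p - T == diff) = 0 := hRc diff (by simpa using hc)
          rw [List.countP_eq_zero] at h0
          have h2 := h0 _ (List.getElem_mem hiP)
          rw [hpdi] at h2
          simp at h2
        rw [if_pos hcd, PySem.Dict.getD_insert]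
        have hsplit : (((prefs.drop i).countP (fun p => 2 * p - T == q) : Nat) : Int)
            = (((prefs.drop (i + 1)).countP (fun p => 2 * p - T == q) : Nat) : Int)
              + (if q = diff then 1 else 0) := by
          rw [hdropP, List.countP_cons, hpdi]
          by_cases hq : q = diff <;> simp [hq]
        by_cases hq : q = diff
        · rw [if_pos hq, hRg]
          subst hq
          rw [hsplit]
          simp
        · rw [if_neg hq, hRg, hsplit]
          simp [hq]
      · intro q hq
        apply hRc
        by_cases hcd : right.contains diff = true
        · rw [if_pos hcd, PySem.Dict.contains_insert] at hq
          simp only [Bool.or_eq_false_iff] at hq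
          exact hq.2
        · rwa [if_neg hcd] at hq

-- ===== VERDICT (by name: the statement is the Claim_ definition above) =====
-- count on a mapped list, as a countP on the source
theorem count_map_eq_countP (q : Int) (l : List Int) (f : Int → Int) :
    (l.map f).count q = l.countP (fun x => f x == q) := by
  unfold List.count
  rw [List.countP_map]
  apply List.countP_congr
  intro a _
  simp only [Function.comp, beq_iff_eq]

-- top-level form of the parallel induction, at index 0
theorem mainLoopTop (nums prefs : List Int) (k T m0 : Int) (right0 : PySem.Dict Int Int) (sS0 : Int)
    (hT : T = nums.sum) (hprefs : prefs = pvPrefs 0 nums.dropLast)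
    (hsS : sS0 = T - (nums.take 1).sum)
    (hRg : ∀ q, right0.getD q 0 = (prefs.countP (fun p => 2 * p - T == q) : Int))
    (hRc : ∀ q, right0.contains q = false → prefs.countP (fun p => 2 * p - T == q) = 0) :
    ((PySem.List.enumerate nums).foldl (pvAstep k) (m0, PySem.Dict.empty, right0, 0, sS0)).1
      = (PySem.List.pyRange 0 ((nums.length : Nat) : Int) 1).foldl
          (fun best j => pvBstep prefs k T best (j, PySem.List.pyGetD nums j 0)) m0 := by
  rw [← List.foldl_map (f := fun j => ((j : Int), PySem.List.pyGetD nums j 0)) (g := pvBstep prefs k T)]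
  rw [show List.map (fun j => ((j : Int), PySem.List.pyGetD nums j 0))
        (PySem.List.pyRange 0 ((nums.length : Nat) : Int) 1) = PySem.List.enumerate nums from
      (PySem.List.enumerate_eq_map_pyRange nums 0).symm]
  exact mainLoop nums prefs k T hT hprefs nums 0 m0 0 sS0 PySem.Dict.empty right0
    List.drop_zero (by simp) (by simpa using hsS)
    (by intro q; simp) (by intro q _; simp) (by simpa using hRg)
    hRc

theorem count_max_partitions_spec : Claim_equal_count_max_partitions := by
  intro nums k _ hpre
  show count_max_partitions nums k = count_max_partitions_alt nums k
  obtain ⟨h, t, rfl⟩ : ∃ h t, nums = h :: t := by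
    cases nums with
    | nil => exact absurd rfl hpre
    | cons h t => exact ⟨h, t, rfl⟩
  simp only [count_max_partitions, count_max_partitions_alt]
  rw [PySem.List.slice_to_neg_one, PySem.List.slice_to_neg_one]
  rw [PySem.List.foldl_pyRange_pyGetD' (h::t) 0
        (fun (st : Int × Int) x => (if 2 * st.2 == (h::t).sum then st.1 + 1 else st.1, st.2 + x))
        (0, PySem.List.pyGetD (h::t) 0 0) (by omega)]
  rw [show Int.toNat 1 = 1 from rfl]
  rw [show List.drop 1 (h :: t) = t from rfl]
  rw [show PySem.List.pyGetD (h :: t) 0 0 = h from by simp [pysem]]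
  rw [loop1_eq ((h :: t).sum) t 0 h]
  rw [loop2_eq ((h :: t).sum) ((h :: t).reverse.dropLast) 0 PySem.Dict.empty 0]
  rw [bprefs_eq ((h :: t).dropLast) 0 []]
  rw [show pvTested h t = pvPrefs 0 ((h :: t).dropLast) from by
    rw [pvTested_eq, ← pvPrefs_dropLast]
    congr 1
    simp [pvPrefs]]
  rw [show ([] : List Int) ++ pvPrefs 0 ((h :: t).dropLast) = pvPrefs 0 ((h :: t).dropLast) from
    List.nil_append _]
  rw [show (0 : Int) + ((h :: t).reverse.dropLast.sum) = (h :: t).reverse.dropLast.sum from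
    zero_add _]
  rw [PySem.List.foldl_if_add_one (fun p => 2 * p == (h :: t).sum) (pvPrefs 0 ((h :: t).dropLast)) 0]
  rw [show (0 : Int) + ((List.countP (fun p => 2 * p == (h :: t).sum)
        (pvPrefs 0 ((h :: t).dropLast)) : Nat) : Int)
      = ((List.countP (fun p => 2 * p == (h :: t).sum) (pvPrefs 0 ((h :: t).dropLast)) : Nat) : Int) from
    zero_add _]
  have hcnt : ∀ q : Int, (pvDiffs (h :: t).sum 0 ((h :: t).reverse.dropLast)).count q
      = (pvPrefs 0 (h :: t).dropLast).countP (fun p => 2 * p - (h :: t).sum == q) := by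
    intro q
    rw [pvDiffs_eq_map, revPrefs_eq, List.map_reverse, List.count_reverse, List.map_map,
        count_map_eq_countP]
    apply List.countP_congr
    intro p _
    simp only [Function.comp, beq_iff_eq]
    omega
  exact mainLoopTop (h :: t) (pvPrefs 0 (h :: t).dropLast) k ((h :: t).sum)
    ((List.countP (fun p => 2 * p == (h :: t).sum) (pvPrefs 0 (h :: t).dropLast) : Nat) : Int)
    (List.foldl pvCStep PySem.Dict.empty (pvDiffs (h :: t).sum 0 (h :: t).reverse.dropLast))
    ((h :: t).reverse.dropLast.sum)
    rfl rfl
    (by rw [List.dropLast_reverse, List.sum_reverse]; simp)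
    (by
      intro q
      rw [counterFold_getD, hcnt]
      simp)
    (by
      intro q hq
      rw [counterFold_contains] at hq
      simp only [PySem.Dict.contains_empty, Bool.false_or, decide_eq_false_iff_not] at hq
      rw [List.countP_eq_zero]
      intro p hp
      simp only [beq_iff_eq]
      intro he
      apply hq
      rw [pvDiffs_eq_map, revPrefs_eq, List.map_reverse, List.mem_reverse, List.map_map]
      refine List.mem_map.mpr ⟨p, hp, ?_⟩
      simp only [Function.comp]
      omega)
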